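-- pv_equiv track=rewrite | github.com/MelihSahinEdu/McChannelCoding | functions.py | RLIM_error_correction_single
-- ===== SOURCE A (Python) =====
-- def RLIM_error_correction_single(arr, order):
--     n = len(arr)
--     out = [0] * n
--     skip = order
--
--     for t in range(n):
--         if skip > 0:
--             out[t] = 0
--             skip -= 1
--         elif arr[t] == 1:
--             out[t] = 1
--             skip = order
--         else:
--             out[t] = 0
--     return out
-- ===== SOURCE B (Python) =====
-- def RLIM_error_correction_single(arr, order):
--     g = max(order, 0)
--     ones = [i for i, x in enumerate(arr) if x == 1]
--     picked = []
--     start = g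
--     for p in ones:
--         if p >= start:
--             picked.append(p)
--             start = p + g + 1
--     sel = set(picked)
--     return [1 if i in sel else 0 for i in range(len(arr))]
-- ===== Notes on version B (the rewrite author's own statement) =====
-- stated objective: alternative
-- what changed: Replaces A's dense per-element countdown state machine with a staged algorithm: collect the indices of the 1s by a comprehension, greedily select over that sparse index list the ones at distance > order apart (starting at max(order,0)), and rebuild the dense 0/1 output by set membership over range(len(arr)).
import Mathlib
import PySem

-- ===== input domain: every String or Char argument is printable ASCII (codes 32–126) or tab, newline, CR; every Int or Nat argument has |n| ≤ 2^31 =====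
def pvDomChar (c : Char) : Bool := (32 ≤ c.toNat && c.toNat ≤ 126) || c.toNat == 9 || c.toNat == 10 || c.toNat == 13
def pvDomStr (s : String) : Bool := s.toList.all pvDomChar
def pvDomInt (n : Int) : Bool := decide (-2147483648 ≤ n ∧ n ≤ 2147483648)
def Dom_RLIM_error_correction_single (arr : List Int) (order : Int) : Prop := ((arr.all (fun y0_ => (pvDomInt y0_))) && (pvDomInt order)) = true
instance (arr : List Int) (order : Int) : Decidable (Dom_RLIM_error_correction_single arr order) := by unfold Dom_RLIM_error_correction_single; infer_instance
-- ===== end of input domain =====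

-- B replaces A's dense countdown state machine with a staged algorithm: extract the indices of
-- the 1s, greedily select those at distance > order over that sparse list, then rebuild the
-- dense output by set membership (objective: alternative).

-- ===== PORT A =====
-- the `for t in range(n)` loop with mutable `out` (preallocated zeros, assigned by index) and `skip`
def RLIM_loopA (arr : List Int) (order : Int) (n : Nat) (t : Nat) (out : List Int) (skip : Int) : List Int :=
  if t < n then
    if skip > 0 then RLIM_loopA arr order n (t + 1) (out.set t 0) (skip - 1)
    else if (PySem.List.pyGet? arr (t : Int)).getD 0 = 1 then
      -- arr[t]: t ∈ range(n) is always in range, so the IndexError case is unreachable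
      RLIM_loopA arr order n (t + 1) (out.set t 1) order
    else RLIM_loopA arr order n (t + 1) (out.set t 0) skip
  else out
termination_by n - t

def RLIM_error_correction_single (arr : List Int) (order : Int) : List Int :=
  RLIM_loopA arr order arr.length 0 (List.replicate arr.length 0) order

-- ===== PORT B =====
-- `[i for i, x in enumerate(arr) if x == 1]`
def RLIM_onesB (arr : List Int) : List Int :=
  ((PySem.List.enumerate arr 0).filter (fun p => p.2 == 1)).map Prod.fst

-- one step of B's greedy selection loop; state = (picked, start)
def RLIM_greedyStep (g : Int) (st : List Int × Int) (p : Int) : List Int × Int :=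
  if p ≥ st.2 then (st.1 ++ [p], p + g + 1) else st

def RLIM_error_correction_single_alt (arr : List Int) (order : Int) : List Int :=
  let g := max order 0
  let picked := ((RLIM_onesB arr).foldl (RLIM_greedyStep g) ([], g)).1
  let sel := PySem.Set.ofList picked
  (PySem.List.pyRange 0 (arr.length : Int) 1).map (fun i => if sel.contains i then 1 else 0)

-- ===== PRECONDITION & SPEC =====
def Spec_RLIM_error_correction_single (arr : List Int) (order : Int) (out : List Int) : Prop := out = RLIM_error_correction_single_alt arr order
instance (arr : List Int) (order : Int) (out : List Int) : Decidable (Spec_RLIM_error_correction_single arr order out) := by unfold Spec_RLIM_error_correction_single; infer_instance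

-- ===== CLAIM (what is proved, stated in full; the proofs are below) =====
def Claim_equal_RLIM_error_correction_single : Prop := ∀ (arr : List Int) (order : Int), Dom_RLIM_error_correction_single arr order → Spec_RLIM_error_correction_single arr order (RLIM_error_correction_single arr order)

-- ===== LEMMAS AND PROOFS =====

-- cons-style reading of A's loop (values only; the write-back into `out` is peeled off separately)
def RLIM_gA (arr : List Int) (order : Int) (n : Nat) (t : Nat) (skip : Int) : List Int :=
  if t < n then
    if skip > 0 then 0 :: RLIM_gA arr order n (t + 1) (skip - 1)
    else if (PySem.List.pyGet? arr (t : Int)).getD 0 = 1 then 1 :: RLIM_gA arr order n (t + 1) order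
    else 0 :: RLIM_gA arr order n (t + 1) skip
  else []
termination_by n - t

-- last-index reading of A over enumerate pairs
def RLIM_bRec (order : Int) (last : Int) : List (Int × Int) → List Int
  | [] => []
  | p :: rest =>
    if p.2 = 1 ∧ p.1 - last > order then 1 :: RLIM_bRec order p.1 rest
    else 0 :: RLIM_bRec order last rest

-- indices of the emitted 1s, recursion over arr with current index k and last emitted index
def RLIM_pick (order : Int) (last : Int) (k : Int) : List Int → List Int
  | [] => []
  | x :: rest =>
    if x = 1 ∧ k - last > order then k :: RLIM_pick order k (k + 1) rest
    else RLIM_pick order last (k + 1) rest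

theorem RLIM_loopA_eq_gA (arr : List Int) (order : Int) (n : Nat) :
    ∀ (k t : Nat) (out : List Int) (skip : Int), n - t = k → out.length = n →
    out.drop t = List.replicate (n - t) 0 →
    RLIM_loopA arr order n t out skip = out.take t ++ RLIM_gA arr order n t skip := by
  intro k
  induction k with
  | zero =>
    intro t out skip hk hlen hdrop
    have ht : ¬ t < n := by omega
    rw [RLIM_loopA, RLIM_gA]
    simp [ht, List.take_of_length_le (show out.length ≤ t by omega)]
  | succ k ih =>
    intro t out skip hk hlen hdrop
    have ht : t < n := by omega
    have htlen : t < out.length := by omega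
    have hgl : ∀ (v : Int), (out.set t v).take (t + 1) = out.take t ++ [v] := by
      intro v
      rw [List.take_add_one, List.take_set, List.set_eq_of_length_le (by simp)]
      simp [htlen]
    have hdrop' : ∀ (v : Int), (out.set t v).drop (t + 1) = List.replicate (n - (t + 1)) 0 := by
      intro v
      have h1 : (out.set t v).drop (t + 1) = out.drop (t + 1) := by
        rw [List.drop_set]; simp
      have h2 : out.drop (t + 1) = (out.drop t).drop 1 := by
        rw [List.drop_drop]
      rw [h1, h2, hdrop]
      cases h3 : n - t with
      | zero => omega
      | succ m =>
        have hm : n - (t + 1) = m := by omega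
        simp [hm]
    have hfin : ∀ (v : Int) (skip' : Int),
        RLIM_loopA arr order n (t + 1) (out.set t v) skip' = out.take t ++ v :: RLIM_gA arr order n (t + 1) skip' := by
      intro v skip'
      rw [ih (t + 1) (out.set t v) skip' (by omega) (by simpa) (hdrop' v), hgl v]
      simp
    rw [RLIM_loopA, RLIM_gA]
    by_cases hs : skip > 0
    · simp only [ht, if_true, hs, if_true]; exact hfin 0 (skip - 1)
    · by_cases he : (PySem.List.pyGet? arr (t : Int)).getD 0 = 1
      · simp only [ht, if_true, hs, if_false, he, if_true]; exact hfin 1 order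
      · simp only [ht, if_true, hs, if_false, he, if_false]; exact hfin 0 skip

-- A's `skip` at the start of step t, in terms of the index of the last emitted 1
def RLIM_sk (order : Int) (t : Nat) (last : Int) : Int :=
  if order > 0 then max (order - ((t : Int) - last - 1)) 0 else order

theorem RLIM_gA_eq_bRec (arr : List Int) (order : Int) :
    ∀ (k t : Nat) (last skip : Int), arr.length - t = k → last < (t : Int) →
    skip = RLIM_sk order t last →
    RLIM_gA arr order arr.length t skip =
      RLIM_bRec order last ((PySem.List.enumerate arr 0).drop t) := by
  intro k
  induction k with
  | zero =>
    intro t last skip hk hlast hskip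
    have ht : ¬ t < arr.length := by omega
    have hnil : (PySem.List.enumerate arr 0).drop t = [] :=
      List.drop_of_length_le (by simp [PySem.List.length_enumerate]; omega)
    rw [RLIM_gA, hnil]
    simp [ht, RLIM_bRec]
  | succ k ih =>
    intro t last skip hk hlast hskip
    have ht : t < arr.length := by omega
    have hte : t < (PySem.List.enumerate arr 0).length := by
      simpa [PySem.List.length_enumerate] using ht
    have hdrop : (PySem.List.enumerate arr 0).drop t
        = ((t : Int), arr[t]) :: (PySem.List.enumerate arr 0).drop (t + 1) := by
      rw [List.drop_eq_getElem_cons hte]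
      congr 1
      rw [PySem.List.getElem_enumerate]
      simp
    have hget : (PySem.List.pyGet? arr (t : Int)).getD 0 = arr[t] := by
      rw [PySem.List.pyGet?_natCast]
      simp [List.getElem?_eq_getElem ht]
    have hsk : skip = if order > 0 then max (order - ((t : Int) - last - 1)) 0 else order := by
      rw [hskip, RLIM_sk]
    rw [hdrop, RLIM_gA, RLIM_bRec]
    by_cases horder : order > 0
    · by_cases hgap : (t : Int) - last > order
      · have hns : ¬ (skip > 0) := by rw [hsk]; simp only [horder, if_true]; omega
        by_cases hx : arr[t] = 1
        · have hc : arr[t] = 1 ∧ (t : Int) - last > order := ⟨hx, hgap⟩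
          simp only [ht, if_true, hns, if_false, hget, hx, if_true, hc, if_true]
          rw [ih (t + 1) ((t : Int)) order (by omega) (by push_cast; omega)
            (by rw [RLIM_sk]; simp only [horder, if_true]; push_cast; omega)]
          simp
        · simp only [ht, if_true, hns, if_false, hget, hx, if_false]
          rw [ih (t + 1) last skip (by omega) (by push_cast; omega)
            (by rw [hsk, RLIM_sk]; simp only [horder, if_true]; push_cast; omega)]
          simp
      · have hpos : skip > 0 := by rw [hsk]; simp only [horder, if_true]; omega
        have hc : ¬ (arr[t] = 1 ∧ (t : Int) - last > order) := by tauto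
        simp only [ht, if_true, hpos, if_true, hc, if_false]
        rw [ih (t + 1) last (skip - 1) (by omega) (by push_cast; omega)
          (by rw [hsk, RLIM_sk]; simp only [horder, if_true]; push_cast; omega)]
    · have hns : ¬ (skip > 0) := by rw [hsk]; split <;> omega
      have hgap : (t : Int) - last > order := by omega
      by_cases hx : arr[t] = 1
      · have hc : arr[t] = 1 ∧ (t : Int) - last > order := ⟨hx, hgap⟩
        simp only [ht, if_true, hns, if_false, hget, hx, if_true, hc, if_true]
        rw [ih (t + 1) ((t : Int)) order (by omega) (by push_cast; omega)
          (by rw [RLIM_sk]; simp only [horder, if_false])]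
        simp
      · simp only [ht, if_true, hns, if_false, hget, hx, if_false]
        rw [ih (t + 1) last skip (by omega) (by push_cast; omega)
          (by rw [hsk, RLIM_sk]; simp only [horder, if_false])]
        simp

-- every index picked at or after position k is ≥ k
theorem RLIM_pick_ge (order : Int) : ∀ (arr : List Int) (last k : Int) (i : Int),
    i ∈ RLIM_pick order last k arr → k ≤ i := by
  intro arr
  induction arr with
  | nil => intro last k i h; simp [RLIM_pick] at h
  | cons x rest ih =>
    intro last k i h
    rw [RLIM_pick] at h
    split at h
    · rcases List.mem_cons.mp h with h1 | h1
      · omega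
      · have := ih k (k + 1) i h1; omega
    · have := ih last (k + 1) i h; omega

-- B's greedy fold over the filtered 1-indices computes RLIM_pick
theorem RLIM_greedy_eq_pick (order : Int) :
    ∀ (arr : List Int) (k last : Int) (acc : List Int), last < k →
    ((((PySem.List.enumerate arr k).filter (fun p => p.2 == 1)).map Prod.fst).foldl
        (RLIM_greedyStep (max order 0)) (acc, last + max order 0 + 1)).1
      = acc ++ RLIM_pick order last k arr := by
  intro arr
  induction arr with
  | nil => intro k last acc h; simp [PySem.List.enumerate_nil, RLIM_pick]
  | cons x rest ih =>
    intro k last acc h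
    rw [PySem.List.enumerate_cons, RLIM_pick]
    by_cases hx : x = 1
    · have hcond : (k ≥ last + max order 0 + 1) ↔ (k - last > order) := by omega
      by_cases hgap : k - last > order
      · have : k ≥ last + max order 0 + 1 := hcond.mpr hgap
        simp only [List.filter_cons, hx, beq_self_eq_true, if_true, List.map_cons,
          List.foldl_cons, RLIM_greedyStep, this, hgap, and_true]
        rw [show k + (max order 0) + 1 = k + max order 0 + 1 from rfl]
        rw [ih (k + 1) k (acc ++ [k]) (by omega)]
        · simp
      · have hnc : ¬ (k ≥ last + max order 0 + 1) := fun hh => hgap (hcond.mp hh)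
        simp only [List.filter_cons, hx, beq_self_eq_true, if_true, List.map_cons,
          List.foldl_cons, RLIM_greedyStep, hnc, ite_false, hgap, and_false]
        rw [ih (k + 1) last acc (by omega)]
    · have hb : (x == (1 : Int)) = false := by simp [hx]
      simp only [List.filter_cons, hb, hx, false_and, if_false]
      exact ih (k + 1) last acc (by omega)

-- A's emissions as a membership map over the index range
theorem RLIM_bRec_eq_map (order : Int) :
    ∀ (arr : List Int) (k last : Int), last < k →
    RLIM_bRec order last (PySem.List.enumerate arr k)
      = (PySem.List.pyRange k (k + (arr.length : Int)) 1).map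
          (fun i => if i ∈ RLIM_pick order last k arr then (1 : Int) else 0) := by
  intro arr
  induction arr with
  | nil =>
    intro k last h
    simp only [List.length_nil, Int.natCast_zero, add_zero, PySem.List.enumerate_nil, RLIM_bRec]
    rw [PySem.List.pyRange_one_eq_nil (le_refl k)]
    simp
  | cons x rest ih =>
    intro k last h
    have hlen : k < k + ((x :: rest).length : Int) := by simp only [List.length_cons]; push_cast; omega
    rw [PySem.List.enumerate_cons, PySem.List.pyRange_one_cons hlen, RLIM_bRec, RLIM_pick]
    have hrange : k + ((x :: rest).length : Int) = (k + 1) + (rest.length : Int) := by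
      simp only [List.length_cons]; push_cast; omega
    by_cases hc : x = 1 ∧ k - last > order
    · rw [if_pos hc, if_pos hc, List.map_cons]
      have hhead : (if k ∈ k :: RLIM_pick order k (k + 1) rest then (1 : Int) else 0) = 1 := by
        simp
      rw [hhead, hrange, ih (k + 1) k (by omega)]
      congr 1
      apply List.map_congr_left
      intro i hi
      have hik : k + 1 ≤ i := (PySem.List.mem_pyRange_one.mp hi).1
      have : i ≠ k := by omega
      simp [List.mem_cons, this]
    · rw [if_neg hc, if_neg hc, List.map_cons]
      have hhead : (if k ∈ RLIM_pick order last (k + 1) rest then (1 : Int) else 0) = 0 := by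
        have : k ∉ RLIM_pick order last (k + 1) rest := fun hm => by
          have := RLIM_pick_ge order rest last (k + 1) k hm; omega
        simp [this]
      rw [hhead, hrange, ih (k + 1) last (by omega)]

-- ===== VERDICT (by name: the statement is the Claim_ definition above) =====
theorem RLIM_error_correction_single_spec : Claim_equal_RLIM_error_correction_single := by
  intro arr order _
  unfold Spec_RLIM_error_correction_single RLIM_error_correction_single
    RLIM_error_correction_single_alt RLIM_onesB
  rw [RLIM_loopA_eq_gA arr order arr.length (arr.length - 0) 0 _ order rfl (by simp) (by simp)]
  rw [RLIM_gA_eq_bRec arr order (arr.length - 0) 0 (-1) order rfl (by norm_num)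
    (by rw [RLIM_sk]; split <;> omega)]
  simp only [List.drop_zero, List.take_zero, List.nil_append]
  rw [RLIM_bRec_eq_map order arr 0 (-1) (by norm_num)]
  have hg : (-1 : Int) + max order 0 + 1 = max order 0 := by omega
  rw [show (([],
        max order 0) : List Int × Int) = (([] : List Int), (-1 : Int) + max order 0 + 1) by rw [hg]]
  rw [RLIM_greedy_eq_pick order arr 0 (-1) [] (by norm_num)]
  simp only [List.nil_append, zero_add]
  apply List.map_congr_left
  intro i _
  by_cases hm : i ∈ RLIM_pick order (-1) 0 arr
  · simp [PySem.Set.mem_ofList, hm]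
  · simp [PySem.Set.mem_ofList, hm]
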